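-- pv_equiv track=rewrite | github.com/asusoda/soda-platform | modules/auth/url_utils.py | is_domain_authorized
-- ===== SOURCE A (Python) =====
-- from typing import Optional, Dict, List, Tuple
--
-- def is_domain_authorized(origin_domain: str, allowed_domains: List[str]) -> bool:
--     """
--     Check if a domain is authorized for authentication.
--
--     Args:
--         origin_domain: The domain making the request
--         allowed_domains: List of domains allowed for this organization
--
--     Returns:
--         True if domain is authorized, False otherwise
--     """
--     if not origin_domain or not allowed_domains:
--         return False
--
--     # Normalize the origin domain
--     origin_domain = origin_domain.lower().strip()
--
--     # Check if origin domain matches any allowed domain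
--     for allowed_domain in allowed_domains:
--         allowed_domain = allowed_domain.lower().strip()
--
--         # Exact match
--         if origin_domain == allowed_domain:
--             return True
--
--         # Subdomain match (e.g., app.example.com matches example.com)
--         if origin_domain.endswith('.' + allowed_domain):
--             return True
--
--     return False
-- ===== SOURCE B (Python) =====
-- def is_domain_authorized(origin_domain, allowed_domains):
--     if not origin_domain or not allowed_domains:
--         return False
--     origin = origin_domain.lower().strip()
--     allowed = {d.lower().strip() for d in allowed_domains}
--     candidates = [origin]
--     for i, ch in enumerate(origin):
--         if ch == '.':
--             candidates.append(origin[i + 1:])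
--     return any(c in allowed for c in candidates)
-- ===== Notes on version B (the rewrite author's own statement) =====
-- stated objective: alternative
-- what changed: B builds a set of normalized allowed domains once and generates the origin's dot-suffix candidates, replacing A's per-allowed-domain endswith scan with set membership of the candidates.
import Mathlib
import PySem

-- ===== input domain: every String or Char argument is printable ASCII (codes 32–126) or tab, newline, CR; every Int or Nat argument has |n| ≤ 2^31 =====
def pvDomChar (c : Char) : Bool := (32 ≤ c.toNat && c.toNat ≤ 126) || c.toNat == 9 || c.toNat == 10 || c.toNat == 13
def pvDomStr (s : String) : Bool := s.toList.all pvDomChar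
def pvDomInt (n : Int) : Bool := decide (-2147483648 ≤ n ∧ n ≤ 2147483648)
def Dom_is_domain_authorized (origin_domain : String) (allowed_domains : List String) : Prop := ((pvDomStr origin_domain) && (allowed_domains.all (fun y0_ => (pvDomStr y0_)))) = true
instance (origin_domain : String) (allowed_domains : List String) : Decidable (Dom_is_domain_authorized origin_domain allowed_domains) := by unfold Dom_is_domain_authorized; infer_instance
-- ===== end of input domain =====

-- B replaces A's per-allowed-domain endswith scan by one set of normalized allowed
-- domains plus the origin's dot-suffix candidates (alternative decomposition; return value only).

-- ===== PORT A =====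
def is_domain_authorized (origin_domain : String) (allowed_domains : List String) : Bool :=
  if origin_domain == "" || allowed_domains.isEmpty then false
  else
    let o := PySem.Chars.strip (PySem.Chars.lower origin_domain.toList)
    allowed_domains.any (fun allowed_domain =>
      let a := PySem.Chars.strip (PySem.Chars.lower allowed_domain.toList)
      (o == a) || PySem.Chars.endswith o ('.' :: a))

-- ===== PORT B =====
def pvNorm (s : String) : List Char := PySem.Chars.strip (PySem.Chars.lower s.toList)

def pvDotSuffixes : List Char → List (List Char)
  | [] => []
  | c :: cs => if c = '.' then cs :: pvDotSuffixes cs else pvDotSuffixes cs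

def is_domain_authorized_alt (origin_domain : String) (allowed_domains : List String) : Bool :=
  if origin_domain == "" || allowed_domains.isEmpty then false
  else
    let o := pvNorm origin_domain
    let allowed : PySem.Set (List Char) := PySem.Set.ofList (allowed_domains.map pvNorm)
    (o :: pvDotSuffixes o).any (fun c => PySem.Set.contains allowed c)

-- ===== PRECONDITION & SPEC =====
def Spec_is_domain_authorized (origin_domain : String) (allowed_domains : List String) (out : Bool) : Prop := out = is_domain_authorized_alt origin_domain allowed_domains
instance (origin_domain : String) (allowed_domains : List String) (out : Bool) : Decidable (Spec_is_domain_authorized origin_domain allowed_domains out) := by unfold Spec_is_domain_authorized; infer_instance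

-- ===== CLAIM (what is proved, stated in full; the proofs are below) =====
def Claim_equal_is_domain_authorized : Prop := ∀ (origin_domain : String) (allowed_domains : List String), Dom_is_domain_authorized origin_domain allowed_domains → Spec_is_domain_authorized origin_domain allowed_domains (is_domain_authorized origin_domain allowed_domains)

-- ===== LEMMAS AND PROOFS =====
theorem mem_pvDotSuffixes (o a : List Char) : a ∈ pvDotSuffixes o ↔ ('.' :: a) <:+ o := by
  induction o with
  | nil => simp [pvDotSuffixes]
  | cons c cs ih =>
    rw [List.suffix_cons_iff]
    by_cases h : c = '.'
    · subst h
      simp [pvDotSuffixes, ih, List.cons.injEq]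
    · simp only [pvDotSuffixes, if_neg h, ih, List.cons.injEq]
      constructor
      · exact Or.inr
      · rintro (⟨h1, _⟩ | hs)
        · exact absurd h1.symm h
        · exact hs

-- ===== VERDICT (by name: the statement is the Claim_ definition above) =====
theorem is_domain_authorized_spec : Claim_equal_is_domain_authorized := by
  intro od ad _
  unfold Spec_is_domain_authorized is_domain_authorized is_domain_authorized_alt
  split_ifs with h
  · rfl
  · rw [Bool.eq_iff_iff]
    simp only [List.any_eq_true, List.mem_cons, PySem.Set.contains,
      PySem.Set.mem_ofList, List.mem_map, Bool.or_eq_true, beq_iff_eq,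
      PySem.Chars.endswith_iff, ← mem_pvDotSuffixes, pvNorm, List.contains_eq_mem,
      decide_eq_true_eq]
    constructor
    · rintro ⟨a, ha, heq | hs⟩
      · exact ⟨_, Or.inl heq.symm, a, ha, rfl⟩
      · exact ⟨_, Or.inr hs, a, ha, rfl⟩
    · rintro ⟨c, hc, a, ha, rfl⟩
      rcases hc with heq | hs
      · exact ⟨a, ha, Or.inl heq.symm⟩
      · exact ⟨a, ha, Or.inr hs⟩
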